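-- pv_equiv track=rewrite | github.com/Jnath33/discord_games | card/belote_card_game.py | start_player_to_play_list
-- ===== SOURCE A (Python) =====
-- get_next = {"n": "e", "e": "s", "s": "o", "o": "n"}
--
-- def start_player_to_play_list(f_p, s=None, r_list=None):
--     if r_list is None:
--         r_list = []
--     if f_p == s:
--         return r_list
--     else:
--         r_list.append(f_p)
--         if s is None:
--             return start_player_to_play_list(get_next[f_p], f_p, r_list)
--         else:
--             return start_player_to_play_list(get_next[f_p], s, r_list)
-- ===== SOURCE B (Python) =====
-- CYCLE = ["n", "e", "s", "o"]
--
-- def start_player_to_play_list(f_p, s=None, r_list=None):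
--     # Closed form: the answer is the cycle rotated to start at f_p, cut before s.
--     # Like A, this mutates and returns the caller's r_list when one is passed.
--     if r_list is None:
--         r_list = []
--     if f_p == s:
--         return r_list
--     i = CYCLE.index(f_p)
--     rot = CYCLE[i:] + CYCLE[:i]
--     if s is None:
--         seg = rot
--     else:
--         seg = rot[:rot.index(s)]
--     r_list.extend(seg)
--     return r_list
-- ===== Notes on version B (the rewrite author's own statement) =====
-- stated objective: simpler
-- what changed: Replaces the tail recursion stepping through the get_next dict with a closed form: rotate the fixed 4-player cycle to start at f_p and cut it before s, extending r_list once.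
import Mathlib
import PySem

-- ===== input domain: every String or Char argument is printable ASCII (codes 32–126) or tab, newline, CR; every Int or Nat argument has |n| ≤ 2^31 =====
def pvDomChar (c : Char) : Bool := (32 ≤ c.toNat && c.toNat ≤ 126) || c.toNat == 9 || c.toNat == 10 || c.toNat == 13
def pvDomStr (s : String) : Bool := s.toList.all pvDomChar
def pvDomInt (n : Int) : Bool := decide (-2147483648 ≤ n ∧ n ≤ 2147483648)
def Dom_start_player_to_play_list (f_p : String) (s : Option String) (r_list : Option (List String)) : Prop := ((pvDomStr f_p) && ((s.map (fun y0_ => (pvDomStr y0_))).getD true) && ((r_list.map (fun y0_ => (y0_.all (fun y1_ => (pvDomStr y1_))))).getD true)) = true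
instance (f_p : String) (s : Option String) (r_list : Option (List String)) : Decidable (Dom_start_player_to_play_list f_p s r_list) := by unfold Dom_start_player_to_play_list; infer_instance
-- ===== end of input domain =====

-- B replaces A's tail recursion by a closed form over the fixed 4-player cycle (objective: simpler).
-- Equivalence is about the RETURN value only: in Python both A and B mutate the caller's r_list.

-- ===== PORT A =====
def get_next : PySem.Dict String String := PySem.Dict.mk [("n","e"),("e","s"),("s","o"),("o","n")]

-- fuel only makes the recursion total; 5 ≥ the call depth on every input where A returns
def start_player_to_play_list_go : Nat → String → Option String → List String → List String
  | 0, _, _, _ => []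
  | fuel+1, f_p, s, r_list =>
    if some f_p = s then r_list
    else
      let r_list := r_list ++ [f_p]
      match PySem.Dict.get? get_next f_p with
      | none => []  -- KeyError; excluded by Pre_
      | some nxt =>
        match s with
        | none => start_player_to_play_list_go fuel nxt (some f_p) r_list
        | some _ => start_player_to_play_list_go fuel nxt s r_list

def start_player_to_play_list (f_p : String) (s : Option String) (r_list : Option (List String)) : List String :=
  start_player_to_play_list_go 5 f_p s (r_list.getD [])

-- ===== PORT B =====
def pvCycle : List String := ["n", "e", "s", "o"]

def start_player_to_play_list_alt (f_p : String) (s : Option String) (r_list : Option (List String)) : List String :=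
  let r := r_list.getD []
  if some f_p = s then r
  else
    match PySem.List.index? pvCycle f_p with
    | none => []  -- ValueError; excluded by Pre_
    | some i =>
      let rot := PySem.List.slice pvCycle (some (i : Int)) none ++ PySem.List.slice pvCycle none (some (i : Int))
      match s with
      | none => r ++ rot
      | some sv =>
        match PySem.List.index? rot sv with
        | none => []  -- ValueError; excluded by Pre_
        | some j => r ++ PySem.List.slice rot none (some (j : Int))

-- ===== PRECONDITION & SPEC =====
-- Pre_ = exactly the inputs where A returns: it raises KeyError when f_p ∉ {n,e,s,o} (unless f_p == s),
-- and recurses forever (RecursionError) when s is given but outside the cycle.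
def Pre_start_player_to_play_list (f_p : String) (s : Option String) (r_list : Option (List String)) : Prop :=
  s = some f_p ∨
  (f_p ∈ pvCycle ∧ (s = none ∨ s = some "n" ∨ s = some "e" ∨ s = some "s" ∨ s = some "o"))
instance (f_p : String) (s : Option String) (r_list : Option (List String)) : Decidable (Pre_start_player_to_play_list f_p s r_list) := by unfold Pre_start_player_to_play_list; infer_instance

def pvWitness_start_player_to_play_list : String × Option String × Option (List String) := ("e", some "n", some ["q"])

def Spec_start_player_to_play_list (f_p : String) (s : Option String) (r_list : Option (List String)) (out : List String) : Prop := out = start_player_to_play_list_alt f_p s r_list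
instance (f_p : String) (s : Option String) (r_list : Option (List String)) (out : List String) : Decidable (Spec_start_player_to_play_list f_p s r_list out) := by unfold Spec_start_player_to_play_list; infer_instance

-- ===== CLAIM (what is proved, stated in full; the proofs are below) =====
def Claim_equal_start_player_to_play_list : Prop := ∀ (f_p : String) (s : Option String) (r_list : Option (List String)), Dom_start_player_to_play_list f_p s r_list → Pre_start_player_to_play_list f_p s r_list → Spec_start_player_to_play_list f_p s r_list (start_player_to_play_list f_p s r_list)

-- ===== LEMMAS AND PROOFS =====

-- ===== VERDICT (by name: the statement is the Claim_ definition above) =====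
theorem start_player_to_play_list_spec : Claim_equal_start_player_to_play_list := by
  intro f_p s r_list _ hpre
  unfold Spec_start_player_to_play_list
  rcases hpre with h | ⟨hf, hs⟩
  · subst h
    simp [start_player_to_play_list, start_player_to_play_list_go, start_player_to_play_list_alt]
  · fin_cases hf <;>
      rcases hs with h | h | h | h | h <;> subst h <;>
      simp [start_player_to_play_list, start_player_to_play_list_go, start_player_to_play_list_alt,
        get_next, pvCycle, PySem.Dict.get?_mk_cons, PySem.List.index?, PySem.List.slice,
        List.idxOf?, List.findIdx?, List.findIdx?.go]
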